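-- pv_equiv track=rewrite | github.com/vpore/BDA | fm-prac.py | count
-- ===== SOURCE A (Python) =====
-- def count(x):
--     temp, final = 0,0
--     one = False
--
--     for i in x[::-1]:
--         if i == '1':
--             one = True
--             break
--         temp += 1
--
--     if one:
--         final = temp
--     return final
-- ===== SOURCE B (Python) =====
-- def count(x):
--     last_one = -1
--     for i, c in enumerate(x):
--         if c == '1':
--             last_one = i
--     if last_one == -1:
--         return 0
--     return len(x) - 1 - last_one
-- ===== Notes on version B (the rewrite author's own statement) =====
-- stated objective: alternative
-- what changed: A scans the reversed list counting elements until it hits the first '1' (early break); B makes one forward enumerate pass tracking the index of the last '1' and returns len(x)-1-last_one by arithmetic.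
import Mathlib
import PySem

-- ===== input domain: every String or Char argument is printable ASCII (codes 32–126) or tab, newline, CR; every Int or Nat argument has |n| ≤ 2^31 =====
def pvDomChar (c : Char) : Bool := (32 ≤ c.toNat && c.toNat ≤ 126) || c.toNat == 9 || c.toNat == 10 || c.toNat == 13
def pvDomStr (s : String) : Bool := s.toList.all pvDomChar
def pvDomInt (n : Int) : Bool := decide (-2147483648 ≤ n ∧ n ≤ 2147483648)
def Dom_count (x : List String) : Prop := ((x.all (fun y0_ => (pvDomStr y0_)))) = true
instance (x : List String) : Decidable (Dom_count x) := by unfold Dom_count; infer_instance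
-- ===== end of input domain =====

-- B replaces A's reverse early-exit counting loop by a forward enumerate pass tracking the last '1' index (alternative decomposition; same cost).

-- ===== PORT A =====
-- A's for-loop over x[::-1] with its break: state (temp, one)
def countLoop : List String → Int → Int × Bool
  | [], temp => (temp, false)
  | i :: rest, temp => if i = "1" then (temp, true) else countLoop rest (temp + 1)

def count (x : List String) : Int :=
  let r := countLoop x.reverse 0   -- x[::-1] is List.reverse
  let final : Int := if r.2 then r.1 else 0
  final

-- ===== PORT B =====
def count_alt (x : List String) : Int :=
  let last_one : Int :=
    (PySem.List.enumerate x).foldl (fun acc p => if p.2 = "1" then p.1 else acc) (-1)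
  if last_one = -1 then 0 else (x.length : Int) - 1 - last_one

-- ===== PRECONDITION & SPEC =====
def Spec_count (x : List String) (out : Int) : Prop := out = count_alt x
instance (x : List String) (out : Int) : Decidable (Spec_count x out) := by unfold Spec_count; infer_instance

-- ===== CLAIM (what is proved, stated in full; the proofs are below) =====
def Claim_equal_count : Prop := ∀ (x : List String), Dom_count x → Spec_count x (count x)

-- ===== LEMMAS AND PROOFS =====

-- number of leading non-"1" entries (applied to reversed lists: trailing non-"1" entries)
def twLen (l : List String) : Nat := (l.takeWhile (fun t => t ≠ "1")).length

theorem countLoop_eq (l : List String) : ∀ t : Int,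
    countLoop l t = if "1" ∈ l then (t + (twLen l : Int), true) else (t + l.length, false) := by
  induction l with
  | nil => intro t; simp [countLoop]
  | cons a r ih =>
    intro t
    by_cases h : a = "1"
    · simp [countLoop, h, twLen, List.takeWhile]
    · simp only [countLoop, h, if_false, ih, twLen, List.takeWhile]
      by_cases hm : "1" ∈ r
      · simp [hm, Ne.symm h, h]
        push_cast; ring
      · simp [hm, Ne.symm h, h]
        push_cast; ring

theorem tw_append_stop {α : Type} (p : α → Bool) (u v : List α) (h : ∃ x ∈ u, p x = false) :
    (u ++ v).takeWhile p = u.takeWhile p := by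
  induction u with
  | nil => simp at h
  | cons a r ih =>
    cases hp : p a with
    | false => simp [List.takeWhile_cons, hp]
    | true =>
      have hr : ∃ x ∈ r, p x = false := by
        rcases h with ⟨x, hx, hpx⟩
        rcases List.mem_cons.mp hx with rfl | hx
        · rw [hp] at hpx; cases hpx
        · exact ⟨x, hx, hpx⟩
      simp [List.takeWhile_cons, hp, ih hr]

theorem tw_append_go {α : Type} (p : α → Bool) (u v : List α) (h : ∀ x ∈ u, p x = true) :
    (u ++ v).takeWhile p = u ++ v.takeWhile p := by
  induction u with
  | nil => simp
  | cons a r ih =>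
    have hp := h a (by simp)
    simp [List.takeWhile_cons, hp, ih (fun x hx => h x (by simp [hx]))]

theorem tw_lt {α : Type} (p : α → Bool) (l : List α) (h : ∃ x ∈ l, p x = false) :
    (l.takeWhile p).length < l.length := by
  induction l with
  | nil => simp at h
  | cons a r ih =>
    cases hp : p a with
    | false => simp [List.takeWhile_cons, hp]
    | true =>
      have hr : ∃ x ∈ r, p x = false := by
        rcases h with ⟨x, hx, hpx⟩
        rcases List.mem_cons.mp hx with rfl | hx
        · rw [hp] at hpx; cases hpx
        · exact ⟨x, hx, hpx⟩
      have := ih hr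
      simp [List.takeWhile_cons, hp]
      omega

theorem foldl_last (l : List String) : ∀ s acc : Int,
    (PySem.List.enumerate l s).foldl (fun acc p => if p.2 = "1" then p.1 else acc) acc
      = if "1" ∈ l then s + (l.length : Int) - 1 - (twLen l.reverse : Int) else acc := by
  induction l with
  | nil => intro s acc; simp [PySem.List.enumerate]
  | cons a r ih =>
    intro s acc
    rw [PySem.List.enumerate_cons, List.foldl_cons, ih]
    by_cases hr : "1" ∈ r
    · have hrev : "1" ∈ r.reverse := List.mem_reverse.mpr hr
      have htw : twLen ((a :: r).reverse) = twLen r.reverse := by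
        unfold twLen
        rw [List.reverse_cons, tw_append_stop _ _ _ ⟨"1", hrev, by simp⟩]
      rw [if_pos hr, if_pos (by simp [hr] : "1" ∈ a :: r), htw, List.length_cons]
      push_cast; ring
    · have hrev : "1" ∉ r.reverse := fun hm => hr (List.mem_reverse.mp hm)
      by_cases ha : a = "1"
      · subst ha
        have htw : twLen (("1" :: r).reverse) = r.length := by
          unfold twLen
          rw [List.reverse_cons,
            tw_append_go _ _ _ (fun x hx => by simp; rintro rfl; exact hrev hx)]
          simp
        rw [if_neg hr, if_pos rfl, if_pos (by simp : "1" ∈ "1" :: r), htw, List.length_cons]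
        push_cast; omega
      · have hm : "1" ∉ a :: r := by
          simp [hr]
          exact fun hc => ha hc.symm
        rw [if_neg hr, if_neg ha, if_neg hm]

-- ===== VERDICT (by name: the statement is the Claim_ definition above) =====
theorem count_spec : Claim_equal_count := by
  intro x _
  unfold Spec_count count count_alt
  rw [countLoop_eq, foldl_last]
  by_cases h : "1" ∈ x
  · have hrev : "1" ∈ x.reverse := List.mem_reverse.mpr h
    have hlt : (twLen x.reverse : Int) < x.length := by
      have := tw_lt (fun t => decide (t ≠ "1")) x.reverse ⟨"1", hrev, by simp⟩
      rw [List.length_reverse] at this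
      unfold twLen
      exact_mod_cast this
    simp [hrev, h]
    omega
  · have hrev : "1" ∉ x.reverse := fun hm => h (List.mem_reverse.mp hm)
    simp [hrev, h]
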